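-- pv_equiv track=rewrite | github.com/mjcota/cs-final | analysis_functions.py | get_non_cheater_victims
-- ===== SOURCE A (Python) =====
-- def get_non_cheater_victims(kills_data, cheaters_data):
--     """
--     Filters kills to identify victims who are not cheaters at the time of the kill.
--     """
--     # Extract start dates for all cheaters
--     cheater_start_dates = {acc_id: start_date for acc_id, (start_date, _) in cheaters_data.items()}
--     cheaters_set = set(cheater_start_dates.keys())
--     seen_victims = set()
--     result = []
--
--     # Iterate through each kill event in the game to identify non-cheater victims.
--     for match_id, killer_id, victim_id, kill_date in kills_data:
--         if killer_id not in cheaters_set or cheater_start_dates[killer_id] > kill_date: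
--             continue
--         if victim_id in seen_victims or (victim_id in cheaters_set and cheater_start_dates[victim_id] <= kill_date):
--             continue
--         result.append((victim_id, kill_date))
--         seen_victims.add(victim_id)
--
--     return result
-- ===== SOURCE B (Python) =====
-- def get_non_cheater_victims(kills_data, cheaters_data):
--     # Pass 0: start dates of cheaters.
--     start = {acc_id: sd for acc_id, (sd, _) in cheaters_data.items()}
--     # Pass 1: all qualifying (victim, date) pairs, duplicates kept.
--     qualifying = []
--     for _match_id, killer_id, victim_id, kill_date in kills_data:
--         sk = start.get(killer_id)
--         if sk is None or not (sk <= kill_date):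
--             continue
--         sv = start.get(victim_id)
--         if sv is None or kill_date < sv:
--             qualifying.append((victim_id, kill_date))
--     # Pass 2: ordered first-occurrence dedup by victim id.
--     first = {}
--     for victim_id, kill_date in qualifying:
--         if victim_id not in first:
--             first[victim_id] = kill_date
--     return list(first.items())
-- ===== Notes on version B (the rewrite author's own statement) =====
-- stated objective: alternative
-- what changed: A's single fused loop with a seen-set is split into a filter pass collecting all qualifying (victim, date) pairs via dict.get (no membership set) followed by a separate ordered first-occurrence dedup pass building a dict.
import Mathlib
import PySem

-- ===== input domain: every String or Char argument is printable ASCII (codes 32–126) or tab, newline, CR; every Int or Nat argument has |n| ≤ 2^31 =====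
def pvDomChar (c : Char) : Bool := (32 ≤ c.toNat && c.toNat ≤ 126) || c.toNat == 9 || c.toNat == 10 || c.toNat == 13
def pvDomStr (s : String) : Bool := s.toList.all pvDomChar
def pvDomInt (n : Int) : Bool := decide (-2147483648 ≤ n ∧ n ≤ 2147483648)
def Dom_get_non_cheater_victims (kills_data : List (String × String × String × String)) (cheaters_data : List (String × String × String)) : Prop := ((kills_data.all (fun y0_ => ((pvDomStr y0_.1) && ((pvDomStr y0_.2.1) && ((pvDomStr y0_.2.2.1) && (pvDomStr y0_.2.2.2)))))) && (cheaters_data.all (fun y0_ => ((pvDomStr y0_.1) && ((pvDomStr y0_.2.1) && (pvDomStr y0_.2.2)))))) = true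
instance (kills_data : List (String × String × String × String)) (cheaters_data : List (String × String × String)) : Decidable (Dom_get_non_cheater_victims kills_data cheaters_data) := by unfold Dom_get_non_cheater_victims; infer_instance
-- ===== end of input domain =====

-- B splits A's fused filter+dedup loop into a filter pass (dict.get, no membership set) and a separate ordered first-occurrence dedup pass; return values proved equal on Dom.
-- ===== PORT A =====
def get_non_cheater_victims (kills_data : List (String × String × String × String)) (cheaters_data : List (String × String × String)) : List (String × String) :=
  let cheater_start_dates : PySem.Dict String String :=
    cheaters_data.foldl (fun acc c => acc.insert c.1 c.2.1) PySem.Dict.empty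
  let cheaters_set : PySem.Set String := PySem.Set.ofList cheater_start_dates.keys
  let fin := kills_data.foldl (fun (st : PySem.Set String × List (String × String)) kd =>
    if !(PySem.Set.contains cheaters_set kd.2.1) || decide (kd.2.2.2 < cheater_start_dates.getD kd.2.1 "") then st
    else if PySem.Set.contains st.1 kd.2.2.1 || (PySem.Set.contains cheaters_set kd.2.2.1 && decide (cheater_start_dates.getD kd.2.2.1 "" ≤ kd.2.2.2)) then st
    else (PySem.Set.add st.1 kd.2.2.1, st.2 ++ [(kd.2.2.1, kd.2.2.2)]))
    (PySem.Set.empty, [])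
  fin.2

-- ===== PORT B =====
-- B-side helper: the pass-1 test for one kill record (B's loop body, as a named function)
def killQualifies (start : PySem.Dict String String) (kd : String × String × String × String) : Option (String × String) :=
  match start.get? kd.2.1 with
  | none => none
  | some sk =>
    if decide (sk ≤ kd.2.2.2) then
      match start.get? kd.2.2.1 with
      | none => some (kd.2.2.1, kd.2.2.2)
      | some sv => if decide (kd.2.2.2 < sv) then some (kd.2.2.1, kd.2.2.2) else none
    else none

def get_non_cheater_victims_alt (kills_data : List (String × String × String × String)) (cheaters_data : List (String × String × String)) : List (String × String) :=
  let start : PySem.Dict String String :=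
    cheaters_data.foldl (fun acc c => acc.insert c.1 c.2.1) PySem.Dict.empty
  let qualifying : List (String × String) := kills_data.filterMap (killQualifies start)
  (qualifying.foldl (fun (first : PySem.Dict String String) p =>
    if first.contains p.1 then first else first.insert p.1 p.2) PySem.Dict.empty).items

-- ===== PRECONDITION & SPEC =====
def Spec_get_non_cheater_victims (kills_data : List (String × String × String × String)) (cheaters_data : List (String × String × String)) (out : List (String × String)) : Prop := out = get_non_cheater_victims_alt kills_data cheaters_data
instance (kills_data : List (String × String × String × String)) (cheaters_data : List (String × String × String)) (out : List (String × String)) : Decidable (Spec_get_non_cheater_victims kills_data cheaters_data out) := by unfold Spec_get_non_cheater_victims; infer_instance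

-- ===== CLAIM (what is proved, stated in full; the proofs are below) =====
def Claim_equal_get_non_cheater_victims : Prop := ∀ (kills_data : List (String × String × String × String)) (cheaters_data : List (String × String × String)), Dom_get_non_cheater_victims kills_data cheaters_data → Spec_get_non_cheater_victims kills_data cheaters_data (get_non_cheater_victims kills_data cheaters_data)

-- ===== LEMMAS AND PROOFS =====

-- ===== VERDICT (by name: the statement is the Claim_ definition above) =====
-- cheaters_set membership agrees with dict membership
theorem cs_contains (d : PySem.Dict String String) (x : String) :
    PySem.Set.contains (PySem.Set.ofList d.keys) x = d.contains x := by
  simp [PySem.Set.contains, List.contains_eq_mem, PySem.Set.mem_ofList,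
    PySem.Dict.contains_eq_decide_mem_keys]

-- membership after Set.add, as a Bool equation
theorem set_contains_add (s : PySem.Set String) (x y : String) :
    (PySem.Set.add s x).contains y = (s.contains y || (y == x)) := by
  simp [PySem.Set.contains, List.contains_eq_mem, PySem.Set.mem_add, beq_eq_decide]

-- the fused loop of A equals pass2 of B applied to pass1's output
theorem loop_eq (d : PySem.Dict String String)
    (kills : List (String × String × String × String))
    (seen : PySem.Set String) (first : PySem.Dict String String)
    (res : List (String × String))
    (hinv : ∀ v : String, PySem.Set.contains seen v = first.contains v)
    (hres : res = first.items) :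
    (kills.foldl (fun (st : PySem.Set String × List (String × String)) kd =>
      if !(PySem.Set.contains (PySem.Set.ofList d.keys) kd.2.1) || decide (kd.2.2.2 < d.getD kd.2.1 "") then st
      else if PySem.Set.contains st.1 kd.2.2.1 || (PySem.Set.contains (PySem.Set.ofList d.keys) kd.2.2.1 && decide (d.getD kd.2.2.1 "" ≤ kd.2.2.2)) then st
      else (PySem.Set.add st.1 kd.2.2.1, st.2 ++ [(kd.2.2.1, kd.2.2.2)]))
      (seen, res)).2
    = ((kills.filterMap (killQualifies d)).foldl (fun (f : PySem.Dict String String) p =>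
        if f.contains p.1 then f else f.insert p.1 p.2) first).items := by
  induction kills generalizing seen first res with
  | nil => simpa using hres
  | cons kd rest ih =>
    obtain ⟨m, k, v, dt⟩ := kd
    simp only [List.foldl_cons, List.filterMap_cons, killQualifies]
    cases h : d.get? k with
    | none =>
      have hck : (PySem.Set.ofList d.keys).contains k = false := by
        rw [cs_contains, PySem.Dict.contains_eq_isSome_get?, h]; rfl
      simp only [hck, Bool.not_false, Bool.true_or, if_true]
      exact ih seen first res hinv hres
    | some sk =>
      have hck : (PySem.Set.ofList d.keys).contains k = true := by
        rw [cs_contains, PySem.Dict.contains_eq_isSome_get?, h]; rfl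
      have hg : d.getD k "" = sk := PySem.Dict.getD_of_get?_eq_some d "" h
      by_cases hsk : sk ≤ dt
      · have hlt : decide (dt < sk) = false := decide_eq_false (not_lt.mpr hsk)
        have hle : decide (sk ≤ dt) = true := decide_eq_true hsk
        simp only [hck, hg, hlt, hle, Bool.not_true, Bool.false_or,
          Bool.false_eq_true, if_false, if_true]
        cases h2 : d.get? v with
        | none =>
          have hcv : (PySem.Set.ofList d.keys).contains v = false := by
            rw [cs_contains, PySem.Dict.contains_eq_isSome_get?, h2]; rfl
          simp only [hcv, Bool.false_and, Bool.or_false]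
          by_cases hs : PySem.Set.contains seen v = true
          · have hfc : first.contains v = true := (hinv v) ▸ hs
            simp only [hs, if_true, List.foldl_cons, hfc]
            exact ih seen first res hinv hres
          · have hs' : PySem.Set.contains seen v = false := by
              cases hx : PySem.Set.contains seen v
              · rfl
              · exact absurd hx hs
            have hfc : first.contains v = false := (hinv v) ▸ hs'
            simp only [hs', Bool.false_eq_true, if_false, List.foldl_cons, hfc]
            refine ih (PySem.Set.add seen v) (first.insert v dt) (res ++ [(v, dt)]) ?_ ?_
            · intro x
              rw [set_contains_add, PySem.Dict.contains_insert, hinv x, Bool.or_comm]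
            · rw [PySem.Dict.items_insert_of_not_contains first dt hfc, hres]
        | some sv =>
          have hcv : (PySem.Set.ofList d.keys).contains v = true := by
            rw [cs_contains, PySem.Dict.contains_eq_isSome_get?, h2]; rfl
          have hgv : d.getD v "" = sv := PySem.Dict.getD_of_get?_eq_some d "" h2
          by_cases hsv : dt < sv
          · have hlt2 : decide (dt < sv) = true := decide_eq_true hsv
            have hle2 : decide (sv ≤ dt) = false := decide_eq_false (not_le.mpr hsv)
            simp only [hcv, hgv, hle2, hlt2, Bool.and_false, Bool.or_false, if_true]
            by_cases hs : PySem.Set.contains seen v = true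
            · have hfc : first.contains v = true := (hinv v) ▸ hs
              simp only [hs, if_true, List.foldl_cons, hfc]
              exact ih seen first res hinv hres
            · have hs' : PySem.Set.contains seen v = false := by
                cases hx : PySem.Set.contains seen v
                · rfl
                · exact absurd hx hs
              have hfc : first.contains v = false := (hinv v) ▸ hs'
              simp only [hs', Bool.false_eq_true, if_false, List.foldl_cons, hfc]
              refine ih (PySem.Set.add seen v) (first.insert v dt) (res ++ [(v, dt)]) ?_ ?_
              · intro x
                rw [set_contains_add, PySem.Dict.contains_insert, hinv x, Bool.or_comm]
              · rw [PySem.Dict.items_insert_of_not_contains first dt hfc, hres]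
          · have hlt2 : decide (dt < sv) = false := decide_eq_false hsv
            have hle2 : decide (sv ≤ dt) = true := decide_eq_true (not_lt.mp hsv)
            simp only [hcv, hgv, hle2, hlt2, Bool.and_true, Bool.or_true,
              Bool.false_eq_true, if_true, if_false]
            exact ih seen first res hinv hres
      · have hlt : decide (dt < sk) = true := decide_eq_true (not_le.mp hsk)
        have hle : decide (sk ≤ dt) = false := decide_eq_false hsk
        simp only [hck, hg, hlt, hle, Bool.not_true, Bool.false_or,
          Bool.false_eq_true, if_true, if_false]
        exact ih seen first res hinv hres

theorem get_non_cheater_victims_spec : Claim_equal_get_non_cheater_victims := by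
  intro kills cheaters _
  unfold Spec_get_non_cheater_victims
  simp only [get_non_cheater_victims, get_non_cheater_victims_alt]
  apply loop_eq
  · intro v
    simp [PySem.Set.contains, PySem.Set.empty, PySem.Dict.contains_empty]
  · rfl
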